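-- pv_equiv track=rewrite | github.com/yangsuli/tam-simulation | cassandra/cassandra_stages.py | guess_stage_name
-- ===== SOURCE A (Python) =====
-- def get_all_stage_name_list():
--     all_stg_name_list = \
--         ['c_req_handle_stg', 'c_respond_stg', 'msg_in_stg', 'msg_out_stg', 'request_response_stg',
--          # main stages to function in TAD (need for all request), below is 'proc_stg'
--          'read_stg', 'mutation_stg', 'read_repair_stg', 'replicate_on_write_stg', 'gossip_stg', 'anti_entropy_stg',
--          'migration_stg', 'flush_writer_stg', 'misc_stg', 'internal_response_stg', 'hinted_handoff_stg',
--          'memory_meter_stg', 'pend_range_calculator_stg', 'commit_log_archiver_stg', 'anti_entropy_session_stg']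
--     return all_stg_name_list
--
-- def guess_stage_name(guess_input_str):
--     possible_str_list = []
--     for stg_name in get_all_stage_name_list():
--         if guess_input_str in stg_name:
--             possible_str_list.append(stg_name)
--     if len(possible_str_list) > 0:
--         return min(possible_str_list, key=len)
--     raise RuntimeError('Fail to guess for input: ' + guess_input_str)
-- ===== SOURCE B (Python) =====
-- def get_all_stage_name_list():
--     all_stg_name_list = \
--         ['c_req_handle_stg', 'c_respond_stg', 'msg_in_stg', 'msg_out_stg', 'request_response_stg',
--          'read_stg', 'mutation_stg', 'read_repair_stg', 'replicate_on_write_stg', 'gossip_stg', 'anti_entropy_stg',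
--          'migration_stg', 'flush_writer_stg', 'misc_stg', 'internal_response_stg', 'hinted_handoff_stg',
--          'memory_meter_stg', 'pend_range_calculator_stg', 'commit_log_archiver_stg', 'anti_entropy_session_stg']
--     return all_stg_name_list
--
-- # Precomputed once: the stage names ordered by increasing length (stable, so
-- # equal-length names keep their original order, matching min(key=len)'s tie-break).
-- _STAGES_BY_LENGTH = sorted(get_all_stage_name_list(), key=len)
--
-- def guess_stage_name(guess_input_str):
--     # first match in the length-sorted table is the shortest (earliest-on-tie) match
--     for stg_name in _STAGES_BY_LENGTH:
--         if guess_input_str in stg_name: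
--             return stg_name
--     raise RuntimeError('Fail to guess for input: ' + guess_input_str)
-- ===== Notes on version B (the rewrite author's own statement) =====
-- stated objective: alternative
-- what changed: Instead of filtering all matches and reducing with min(key=len), B precomputes the stage list sorted by length once at module load and each call returns the FIRST name containing the input via an early-return scan of that table, so no match list is built and no length comparison happens at call time.
import Mathlib
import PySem

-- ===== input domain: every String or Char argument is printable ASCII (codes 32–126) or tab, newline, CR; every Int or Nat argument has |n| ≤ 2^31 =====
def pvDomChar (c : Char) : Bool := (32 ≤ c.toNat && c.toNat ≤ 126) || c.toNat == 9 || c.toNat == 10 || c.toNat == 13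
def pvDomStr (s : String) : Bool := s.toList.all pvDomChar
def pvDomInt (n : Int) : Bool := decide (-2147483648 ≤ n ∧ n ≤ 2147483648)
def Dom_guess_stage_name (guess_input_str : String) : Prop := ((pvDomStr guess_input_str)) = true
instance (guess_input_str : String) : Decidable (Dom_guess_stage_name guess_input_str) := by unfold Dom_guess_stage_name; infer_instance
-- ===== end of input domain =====

-- B replaces A's filter-all-matches-then-min(key=len) with a table of the stage names
-- sorted by length, built once, scanned for the first match (objective: alternative);
-- both raise on no match — those inputs are outside Pre_.

-- ===== PORT A =====
-- helper get_all_stage_name_list (shared module data)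
def get_all_stage_name_list : List String :=
  ["c_req_handle_stg", "c_respond_stg", "msg_in_stg", "msg_out_stg", "request_response_stg",
   "read_stg", "mutation_stg", "read_repair_stg", "replicate_on_write_stg", "gossip_stg", "anti_entropy_stg",
   "migration_stg", "flush_writer_stg", "misc_stg", "internal_response_stg", "hinted_handoff_stg",
   "memory_meter_stg", "pend_range_calculator_stg", "commit_log_archiver_stg", "anti_entropy_session_stg"]

def guess_stage_name (guess_input_str : String) : String :=
  let possible_str_list :=
    get_all_stage_name_list.foldl
      (fun acc stg_name =>
        if PySem.Str.isIn guess_input_str stg_name then acc ++ [stg_name] else acc) []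
  match PySem.List.min? possible_str_list (fun s => PySem.Str.len s) with
  | some m => m
  | none => ""   -- Python raises RuntimeError here; excluded by Pre_

-- ===== PORT B =====
-- module-level: _STAGES_BY_LENGTH = sorted(get_all_stage_name_list(), key=len)
def pv_STAGES_BY_LENGTH : List String :=
  PySem.List.sorted get_all_stage_name_list (fun s => PySem.Str.len s)

def guess_stage_name_alt (guess_input_str : String) : String :=
  -- 'for name in table: if sub in name: return name' = first match in the sorted table
  match pv_STAGES_BY_LENGTH.find? (fun stg_name => PySem.Str.isIn guess_input_str stg_name) with
  | some stg_name => stg_name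
  | none => ""   -- Python raises RuntimeError here; excluded by Pre_

-- ===== PRECONDITION & SPEC =====
-- Pre_ excludes exactly the inputs on which A (and B) raise RuntimeError: no stage name contains the input.
def Pre_guess_stage_name (guess_input_str : String) : Prop :=
  (get_all_stage_name_list.any (fun stg_name => PySem.Str.isIn guess_input_str stg_name)) = true
instance (guess_input_str : String) : Decidable (Pre_guess_stage_name guess_input_str) := by
  unfold Pre_guess_stage_name; infer_instance

def pvWitness_guess_stage_name : String := "read"

def Spec_guess_stage_name (guess_input_str : String) (out : String) : Prop := out = guess_stage_name_alt guess_input_str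
instance (guess_input_str : String) (out : String) : Decidable (Spec_guess_stage_name guess_input_str out) := by unfold Spec_guess_stage_name; infer_instance

-- ===== CLAIM (what is proved, stated in full; the proofs are below) =====
def Claim_equal_guess_stage_name : Prop := ∀ (guess_input_str : String), Dom_guess_stage_name guess_input_str → Pre_guess_stage_name guess_input_str → Spec_guess_stage_name guess_input_str (guess_stage_name guess_input_str)

-- ===== LEMMAS AND PROOFS =====

-- Inserting x (stably, after equal lengths) into a length-sorted list: the first match is
-- the old first match unless x matches and is strictly shorter.
theorem find_insertBy_len (p : String → Bool) (x : String) (S : List String)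
    (hs : S.Pairwise (fun a b => PySem.Str.len a ≤ PySem.Str.len b)) :
    (PySem.List.insertBy (fun a b => decide (PySem.Str.len a < PySem.Str.len b)) x S).find? p =
      match S.find? p with
      | none => if p x then some x else none
      | some b => if p x ∧ PySem.Str.len x < PySem.Str.len b then some x else some b := by
  induction S with
  | nil =>
    simp only [PySem.List.insertBy, List.find?]
    cases hpx : p x <;> simp
  | cons s S ih =>
    have hs' : S.Pairwise (fun a b => PySem.Str.len a ≤ PySem.Str.len b) :=
      (List.pairwise_cons.mp hs).2
    have hsle : ∀ b ∈ S, PySem.Str.len s ≤ PySem.Str.len b := (List.pairwise_cons.mp hs).1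
    by_cases hlt : PySem.Str.len x < PySem.Str.len s
    · rw [show PySem.List.insertBy (fun a b => decide (PySem.Str.len a < PySem.Str.len b)) x (s :: S)
            = x :: s :: S by rw [PySem.List.insertBy]; rw [if_pos (decide_eq_true hlt)]]
      cases hpx : p x
      · rw [List.find?_cons_of_neg (by simp [hpx])]
        cases hfind : List.find? p (s :: S) <;> simp
      · rw [List.find?_cons_of_pos hpx]
        cases hfind : List.find? p (s :: S) with
        | none => simp
        | some b =>
          have hb : b ∈ s :: S := List.mem_of_find?_eq_some hfind
          have hlb : PySem.Str.len x < PySem.Str.len b := by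
            rcases List.mem_cons.mp hb with h | h
            · exact h ▸ hlt
            · exact lt_of_lt_of_le hlt (hsle b h)
          simp
          intro _
          exfalso
          simp [PySem.Str.len_eq] at hlb
          omega
    · rw [show PySem.List.insertBy (fun a b => decide (PySem.Str.len a < PySem.Str.len b)) x (s :: S)
            = s :: PySem.List.insertBy (fun a b => decide (PySem.Str.len a < PySem.Str.len b)) x S by
            rw [PySem.List.insertBy]; rw [if_neg (by simpa using hlt)]]
      cases hps : p s
      · rw [List.find?_cons_of_neg (by simp [hps]),
            List.find?_cons_of_neg (by simp [hps]), ih hs']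
      · rw [List.find?_cons_of_pos hps, List.find?_cons_of_pos hps]
        simp
        intro _ _
        exfalso
        simp [PySem.Str.len_eq] at hlt
        omega

-- first match in the length-sorted list = the running shortest-match accumulator over the
-- original list (the form A's min?-of-filter reduces to)
theorem find_sorted_eq_foldBest (p : String → Bool) (L : List String) :
    (PySem.List.sorted L (fun s => PySem.Str.len s)).find? p =
      L.foldl
        (fun acc x =>
          if p x then
            match acc with
            | none => some x
            | some m => if PySem.Str.len x < PySem.Str.len m then some x else some m
          else acc)
        none := by
  induction L using List.reverseRecOn with
  | nil => rfl
  | append_singleton L x ih =>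
    rw [PySem.List.sorted_eq_foldl_insertBy, List.foldl_append, List.foldl_append,
        ← PySem.List.sorted_eq_foldl_insertBy]
    simp only [List.foldl_cons, List.foldl_nil]
    rw [find_insertBy_len p x _ (PySem.List.sorted_pairwise L (fun s => PySem.Str.len s)),
        ih]
    cases hacc : L.foldl
        (fun acc x =>
          if p x then
            match acc with
            | none => some x
            | some m => if PySem.Str.len x < PySem.Str.len m then some x else some m
          else acc)
        none with
    | none => cases hpx : p x <;> simp
    | some b => cases hpx : p x <;> simp


theorem guess_stage_name_eq_alt (g : String) :
    guess_stage_name g = guess_stage_name_alt g := by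
  unfold guess_stage_name guess_stage_name_alt pv_STAGES_BY_LENGTH
  rw [show (fun (acc : List String) stg_name =>
        if PySem.Str.isIn g stg_name then acc ++ [stg_name] else acc)
      = (fun acc x => if PySem.Str.isIn g x = true then acc ++ [(fun s => s) x] else acc) by
        funext acc x; simp]
  rw [PySem.List.foldl_append_if (fun s => PySem.Str.isIn g s) (fun s => s) get_all_stage_name_list []]
  rw [find_sorted_eq_foldBest (fun s => PySem.Str.isIn g s) get_all_stage_name_list]
  simp only [List.map_id_fun', id, List.nil_append, PySem.List.min?, List.foldl_filter]
  congr 2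
  funext acc x
  by_cases h : PySem.Str.isIn g x = true <;> simp only [h] <;> cases acc <;> rfl

-- ===== VERDICT (by name: the statement is the Claim_ definition above) =====
theorem guess_stage_name_spec : Claim_equal_guess_stage_name := by
  intro g _ _
  exact guess_stage_name_eq_alt g
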